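-- pv_equiv track=rewrite | github.com/utilmind/MySQL-migration-tools | strip-mysql-compatibility-comments.py | find_conditional_end
-- ===== SOURCE A (Python) =====
-- from typing import Tuple, Optional, Dict, Any
--
-- def find_conditional_end(comment: str) -> Tuple[Optional[int], Optional[int]]:
--     """
--     Given a string that starts with a versioned comment:
--
--         /*!<digits>...
--
--     find the index of the closing "*/" that terminates THIS comment,
--     correctly handling nested regular block comments "/* ... */" inside.
--
--     Returns:
--         (end_pos, digits_end)
--
--         end_pos   - index where the closing "*/" starts (or None if not found)
--         digits_end - index right after the version digits (i.e. start of inner content)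
--     """
--     n = len(comment)
--     # comment[0:3] should be "/*!"
--     j = 3
--     while j < n and comment[j].isdigit():
--         j += 1
--     digits_end = j
--     version_str = comment[3:digits_end]
--     if not version_str:
--         return None, None
--
--     depth = 0
--     k = digits_end
--     end_pos = None
--
--     while k < n - 1:
--         two = comment[k:k + 2]
--
--         if two == "/*":
--             # nested regular block comment
--             depth += 1
--             k += 2
--             continue
--
--         if two == "*/":
--             if depth == 0:
--                 end_pos = k
--                 break
--             else:
--                 depth -= 1
--                 k += 2
--                 continue
--
--         k += 1
--
--     return end_pos, digits_end
-- ===== SOURCE B (Python) =====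
-- import re
--
-- def find_conditional_end(comment):
--     # digits right after the "/*!" prefix
--     m = re.compile(r"\d+").match(comment, 3)
--     if not m:
--         return None, None
--     digits_end = m.end()
--
--     # jump from delimiter token to delimiter token instead of char by char
--     depth = 0
--     k = digits_end
--     while True:
--         c = comment.find("*/", k)
--         if c == -1:
--             return None, digits_end
--         o = comment.find("/*", k)
--         if o != -1 and o < c:
--             depth += 1
--             k = o + 2
--         elif depth == 0:
--             return c, digits_end
--         else:
--             depth -= 1
--             k = c + 2
-- ===== Notes on version B (the rewrite author's own statement) =====
-- stated objective: idiomatic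
-- what changed: B anchors the version digits with a regex match at position 3 and replaces A's per-character while-loop (which slices two characters at every index) by a loop that jumps straight from one str.find-located comment delimiter token to the next, tracking nesting depth only at tokens.
import Mathlib
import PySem

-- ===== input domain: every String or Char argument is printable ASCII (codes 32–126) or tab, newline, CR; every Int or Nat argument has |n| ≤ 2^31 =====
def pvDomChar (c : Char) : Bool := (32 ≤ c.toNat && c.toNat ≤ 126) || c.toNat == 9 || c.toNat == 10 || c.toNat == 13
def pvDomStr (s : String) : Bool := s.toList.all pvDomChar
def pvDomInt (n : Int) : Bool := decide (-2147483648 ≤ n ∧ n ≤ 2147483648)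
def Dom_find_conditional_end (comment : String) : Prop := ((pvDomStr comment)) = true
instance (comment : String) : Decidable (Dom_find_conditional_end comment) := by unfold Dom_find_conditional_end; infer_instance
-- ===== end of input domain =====

-- B replaces A's per-character depth loop by a loop that jumps from one str.find-located
-- comment-delimiter token to the next (and the manual digit scan by a regex match); objective: idiomatic.

-- ===== PORT A =====
-- `j = 3; while j < n and comment[j].isdigit(): j += 1`
def pvSkipDigitsA (cs : List Char) (j : Nat) : Nat :=
  if h : j < cs.length then
    if PySem.Chars.isdigit cs[j] then pvSkipDigitsA cs (j + 1) else j
  else j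
termination_by cs.length - j

-- `while k < n - 1: two = comment[k:k+2]; …` (depth is only decremented when nonzero, so Nat is exact)
def pvScanA (cs : List Char) (k depth : Nat) : Option Int :=
  if h : k + 1 < cs.length then
    let two := (cs.drop k).take 2     -- comment[k:k+2]
    if two = ['/', '*'] then pvScanA cs (k + 2) (depth + 1)
    else if two = ['*', '/'] then
      if depth = 0 then some (k : Int) else pvScanA cs (k + 2) (depth - 1)
    else pvScanA cs (k + 1) depth
  else none
termination_by cs.length - k

def find_conditional_end (comment : String) : Option Int × Option Int :=
  let cs := comment.toList
  let digits_end := pvSkipDigitsA cs 3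
  let version_str := (cs.drop 3).take (digits_end - 3)   -- comment[3:digits_end], both bounds ≥ 0
  if version_str = [] then (none, none)
  else (pvScanA cs digits_end 0, some (digits_end : Int))

-- ===== PORT B =====
-- B's token loop (`c = comment.find(..., k)` each round) — fuel is only a totality device (k advances by ≥ 2
-- each round and recursion happens only with k + 2 ≤ len, so cs.length + 1 rounds never run out)
def pvScanB (cs : List Char) (k depth fuel : Nat) : Option Int :=
  match fuel with
  | 0 => none
  | fuel + 1 =>
    let c := PySem.Chars.findFrom cs ['*', '/'] (k : Int)
    if c = -1 then none
    else
      let o := PySem.Chars.findFrom cs ['/', '*'] (k : Int)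
      if o ≠ -1 ∧ o < c then pvScanB cs (o.toNat + 2) (depth + 1) fuel
      else if depth = 0 then some c
      else pvScanB cs (c.toNat + 2) (depth - 1) fuel

-- `re.compile(r"\d+").match(comment, 3)`: the maximal digit run starting at index 3 (no match ⇔ empty)
def find_conditional_end_alt (comment : String) : Option Int × Option Int :=
  let cs := comment.toList
  let digits := (cs.drop 3).takeWhile PySem.Chars.isdigit
  if digits = [] then (none, none)
  else
    let digits_end := 3 + digits.length
    (pvScanB cs digits_end 0 (cs.length + 1), some (digits_end : Int))

-- ===== PRECONDITION & SPEC =====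
def Spec_find_conditional_end (comment : String) (out : Option Int × Option Int) : Prop := out = find_conditional_end_alt comment
instance (comment : String) (out : Option Int × Option Int) : Decidable (Spec_find_conditional_end comment out) := by unfold Spec_find_conditional_end; infer_instance

-- ===== CLAIM (what is proved, stated in full; the proofs are below) =====
def Claim_equal_find_conditional_end : Prop := ∀ (comment : String), Dom_find_conditional_end comment → Spec_find_conditional_end comment (find_conditional_end comment)

-- ===== LEMMAS AND PROOFS =====

lemma pv_take_two_iff_prefix (cs : List Char) (k : Nat) (a b : Char) :
    (cs.drop k).take 2 = [a, b] ↔ [a, b] <+: cs.drop k := by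
  rw [List.prefix_iff_eq_take]; exact eq_comm

lemma pv_drop_succ_suffix (cs : List Char) (k : Nat) : cs.drop (k + 1) <:+ cs.drop k := by
  simpa [List.drop_drop, Nat.add_comm] using List.drop_suffix 1 (cs.drop k)

lemma pv_infix_drop_mono {sub cs : List Char} {k : Nat} (h : sub <:+: cs.drop (k + 1)) :
    sub <:+: cs.drop k :=
  h.trans (pv_drop_succ_suffix cs k).isInfix

lemma pv_prefix_at_infix {sub cs : List Char} {k i : Nat} (hk : k ≤ i)
    (h : sub <+: cs.drop i) : sub <:+: cs.drop k := by
  have hdrop : (cs.drop k).drop (i - k) = cs.drop i := by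
    rw [List.drop_drop]; congr 1; omega
  exact (hdrop ▸ h).isInfix.trans (List.drop_suffix (i - k) (cs.drop k)).isInfix

-- A's scan returns none when no closing token occurs at or after k
lemma pv_scanA_none (cs : List Char) (k depth : Nat) :
    ¬ ['*', '/'] <:+: cs.drop k → pvScanA cs k depth = none := by
  induction k, depth using pvScanA.induct (cs := cs) with
  | case1 k depth hlt two hopen ih =>
    intro h
    have hopen' : (cs.drop k).take 2 = ['/', '*'] := hopen
    rw [pvScanA]; simp only [hlt, dif_pos, if_pos hopen']
    exact ih (fun hh => h (pv_infix_drop_mono (pv_infix_drop_mono hh)))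
  | case2 k hlt two hopen hclose =>
    intro h
    have hclose' : (cs.drop k).take 2 = ['*', '/'] := hclose
    exact absurd ((pv_take_two_iff_prefix cs k '*' '/').mp hclose').isInfix h
  | case3 k depth hlt two hopen hclose hd ih =>
    intro h
    have hclose' : (cs.drop k).take 2 = ['*', '/'] := hclose
    exact absurd ((pv_take_two_iff_prefix cs k '*' '/').mp hclose').isInfix h
  | case4 k depth hlt two hopen hclose ih =>
    intro h
    have hopen' : ¬ (cs.drop k).take 2 = ['/', '*'] := hopen
    have hclose' : ¬ (cs.drop k).take 2 = ['*', '/'] := hclose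
    rw [pvScanA]; simp only [hlt, dif_pos, if_neg hopen', if_neg hclose']
    exact ih (fun hh => h (pv_infix_drop_mono hh))
  | case5 k depth hge =>
    intro _
    rw [pvScanA]; simp [hge]

-- find of a two-char token returns k when the token sits exactly at k
lemma pv_findFrom_self {cs : List Char} {k : Nat} {a b : Char} (hk : k ≤ cs.length)
    (h : [a, b] <+: cs.drop k) : PySem.Chars.findFrom cs [a, b] (k : Int) = (k : Int) := by
  have hne : PySem.Chars.findFrom cs [a, b] (k : Int) ≠ -1 := fun heq =>
    ((PySem.Chars.findFrom_natCast_eq_neg_one_iff cs [a, b] k hk).mp heq) h.isInfix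
  obtain ⟨h1, h2, h3⟩ := PySem.Chars.findFrom_natCast_spec cs [a, b] k hk hne
  by_contra hneq
  have hlt : k < (PySem.Chars.findFrom cs [a, b] (k : Int)).toNat := by omega
  exact h3 k le_rfl hlt h

-- find of a two-char token gives the same result from k and from k+1 when the token is not at k
lemma pv_findFrom_step {cs : List Char} {k : Nat} {a b : Char} (hk : k + 1 ≤ cs.length)
    (h : ¬ [a, b] <+: cs.drop k) :
    PySem.Chars.findFrom cs [a, b] (k : Int) = PySem.Chars.findFrom cs [a, b] ((k + 1 : Nat) : Int) := by
  have hk0 : k ≤ cs.length := by omega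
  by_cases hc : PySem.Chars.findFrom cs [a, b] (k : Int) = -1
  · rw [hc]; symm
    rw [PySem.Chars.findFrom_natCast_eq_neg_one_iff cs [a, b] (k + 1) hk]
    intro hh
    exact ((PySem.Chars.findFrom_natCast_eq_neg_one_iff cs [a, b] k hk0).mp hc)
      (pv_infix_drop_mono hh)
  · obtain ⟨h1, h2, h3⟩ := PySem.Chars.findFrom_natCast_spec cs [a, b] k hk0 hc
    set r := PySem.Chars.findFrom cs [a, b] (k : Int) with hr
    have hrk : k + 1 ≤ r.toNat := by
      rcases Nat.lt_or_ge k r.toNat with hlt | hge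
      · omega
      · exact absurd ((show r.toNat = k by omega) ▸ h2) h
    have hc' : PySem.Chars.findFrom cs [a, b] ((k + 1 : Nat) : Int) ≠ -1 := fun heq =>
      ((PySem.Chars.findFrom_natCast_eq_neg_one_iff cs [a, b] (k + 1) hk).mp heq)
        (pv_prefix_at_infix hrk h2)
    obtain ⟨g1, g2, g3⟩ := PySem.Chars.findFrom_natCast_spec cs [a, b] (k + 1) hk hc'
    set r' := PySem.Chars.findFrom cs [a, b] ((k + 1 : Nat) : Int) with hr'
    have e1 : ¬ r'.toNat < r.toNat := fun hlt => h3 r'.toNat (by omega) hlt g2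
    have e2 : ¬ r.toNat < r'.toNat := fun hlt => g3 r.toNat hrk hlt h2
    omega

-- main loop equivalence: B's token-jumping scan computes A's per-character scan
lemma pv_scan_eq (cs : List Char) :
    ∀ m k depth fuel, cs.length - k = m → k ≤ cs.length → cs.length - k < fuel →
      pvScanB cs k depth fuel = pvScanA cs k depth := by
  intro m
  induction m using Nat.strong_induction_on with
  | _ m ih =>
    intro k depth fuel hm hk hfuel
    obtain ⟨f, rfl⟩ : ∃ f, fuel = f + 1 := ⟨fuel - 1, by omega⟩
    by_cases hlt : k + 1 < cs.length
    · by_cases hop : (cs.drop k).take 2 = ['/', '*']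
      · -- an opening token sits at k
        have ho : PySem.Chars.findFrom cs ['/', '*'] (k : Int) = (k : Int) :=
          pv_findFrom_self hk ((pv_take_two_iff_prefix cs k '/' '*').mp hop)
        rw [pvScanA]; simp only [hlt, dif_pos, if_pos hop]
        by_cases hc : PySem.Chars.findFrom cs ['*', '/'] (k : Int) = -1
        · -- no closing token at or after k: both sides return none
          have hni : ¬ ['*', '/'] <:+: cs.drop k :=
            (PySem.Chars.findFrom_natCast_eq_neg_one_iff cs ['*', '/'] k hk).mp hc
          rw [pvScanB]; simp only [hc, if_pos]
          exact (pv_scanA_none cs (k + 2) (depth + 1)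
            (fun hh => hni (pv_infix_drop_mono (pv_infix_drop_mono hh)))).symm
        · obtain ⟨h1, h2, h3⟩ := PySem.Chars.findFrom_natCast_spec cs ['*', '/'] k hk hc
          set c := PySem.Chars.findFrom cs ['*', '/'] (k : Int) with hcdef
          have hck : c.toNat ≠ k := by
            intro he
            have := (pv_take_two_iff_prefix cs k '*' '/').mpr (he ▸ h2)
            rw [this] at hop; simp at hop
          have hcond : (k : Int) ≠ -1 ∧ (k : Int) < c := ⟨by omega, by omega⟩
          rw [pvScanB]
          simp only [← hcdef, hc, ho, hcond, ite_false, Int.toNat_natCast]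
          exact ih (cs.length - (k + 2)) (by omega) (k + 2) (depth + 1) f rfl (by omega) (by omega)
      · by_cases hcl : (cs.drop k).take 2 = ['*', '/']
        · -- a closing token sits at k
          have hcv : PySem.Chars.findFrom cs ['*', '/'] (k : Int) = (k : Int) :=
            pv_findFrom_self hk ((pv_take_two_iff_prefix cs k '*' '/').mp hcl)
          have hc : PySem.Chars.findFrom cs ['*', '/'] (k : Int) ≠ -1 := by rw [hcv]; omega
          have hcond : ¬ (PySem.Chars.findFrom cs ['/', '*'] (k : Int) ≠ -1 ∧
              PySem.Chars.findFrom cs ['/', '*'] (k : Int) < PySem.Chars.findFrom cs ['*', '/'] (k : Int)) := by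
            rintro ⟨hne, hltoc⟩
            have := (PySem.Chars.findFrom_natCast_spec cs ['/', '*'] k hk hne).1
            rw [hcv] at hltoc; omega
          rw [pvScanA, pvScanB]
          simp only [hlt, dif_pos, if_neg hop, if_pos hcl, if_neg hc, if_neg hcond]
          by_cases hd : depth = 0
          · simp only [hd, if_pos, hcv]
          · simp only [hd, ite_false, hcv, Int.toNat_natCast]
            exact ih (cs.length - (k + 2)) (by omega) (k + 2) (depth - 1) f rfl (by omega) (by omega)
        · -- no token at k: A steps one char; B's finds do not see position k
          have hstep : pvScanB cs k depth (f + 1) = pvScanB cs (k + 1) depth (f + 1) := by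
            rw [pvScanB, pvScanB]
            rw [pv_findFrom_step (by omega) (fun hh => hcl ((pv_take_two_iff_prefix cs k '*' '/').mpr hh)),
              pv_findFrom_step (by omega) (fun hh => hop ((pv_take_two_iff_prefix cs k '/' '*').mpr hh))]
          rw [hstep, pvScanA]
          simp only [hlt, dif_pos, if_neg hop, if_neg hcl]
          exact ih (cs.length - (k + 1)) (by omega) (k + 1) depth (f + 1) rfl (by omega) (by omega)
    · -- fewer than two characters remain: no token can occur
      have hc : PySem.Chars.findFrom cs ['*', '/'] (k : Int) = -1 := by
        rw [PySem.Chars.findFrom_natCast_eq_neg_one_iff cs ['*', '/'] k hk]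
        intro hh
        have := hh.length_le
        simp [List.length_drop] at this
        omega
      rw [pvScanA, pvScanB]
      simp [hlt, hc]

-- A's digit scan from j is j plus the length of the maximal digit run at j
lemma pv_skip_digits (cs : List Char) (j : Nat) :
    pvSkipDigitsA cs j = j + ((cs.drop j).takeWhile PySem.Chars.isdigit).length := by
  induction j using pvSkipDigitsA.induct (cs := cs) with
  | case1 j h hd ih =>
    rw [pvSkipDigitsA]
    have hdrop : cs.drop j = cs[j] :: cs.drop (j + 1) := List.drop_eq_getElem_cons h
    simp only [h, dif_pos, hd, if_pos, hdrop, List.takeWhile_cons_of_pos, List.length_cons, ih]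
    omega
  | case2 j h hd =>
    have hdrop : cs.drop j = cs[j] :: cs.drop (j + 1) := List.drop_eq_getElem_cons h
    rw [pvSkipDigitsA]
    simp only [h, dif_pos, hdrop]
    simp [hd]
  | case3 j h =>
    rw [pvSkipDigitsA]
    have hdrop : cs.drop j = ([] : List Char) := List.drop_eq_nil_of_le (by omega)
    simp [h, hdrop]

-- ===== VERDICT (by name: the statement is the Claim_ definition above) =====
theorem find_conditional_end_spec : Claim_equal_find_conditional_end := by
  intro comment _
  unfold Spec_find_conditional_end find_conditional_end find_conditional_end_alt
  simp only []
  set cs := comment.toList with hcs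
  set t := (cs.drop 3).takeWhile PySem.Chars.isdigit with ht
  have hskip : pvSkipDigitsA cs 3 = 3 + t.length := pv_skip_digits cs 3
  have hver : (cs.drop 3).take (3 + t.length - 3) = t := by
    rw [Nat.add_sub_cancel_left]
    exact (List.prefix_iff_eq_take.mp (List.takeWhile_prefix _)).symm
  rw [hskip, hver]
  by_cases hte : t = []
  · simp [hte]
  · have h3 : 3 < cs.length := by
      by_contra hle
      exact hte (by rw [ht, List.drop_eq_nil_of_le (by omega)]; rfl)
    have hlen : t.length ≤ cs.length - 3 := by
      have := (List.takeWhile_prefix (l := cs.drop 3) (p := PySem.Chars.isdigit)).length_le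
      simpa [List.length_drop] using this
    simp only [hte, ite_false]
    rw [pv_scan_eq cs (cs.length - (3 + t.length)) (3 + t.length) 0
      (cs.length + 1) rfl (by omega) (by omega)]
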